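-- pv_equiv track=rewrite | github.com/punal100/UE_PythonEditorUtility | Examples/ProjectLayout/PEU/PythonEditorUtility/Python/PythonEditorUtility/BlenderUvFixerPipelineTool.py | _resolve_matching_export_preset_name
-- ===== SOURCE A (Python) =====
-- def _normalize_export_preset_key(value: str) -> str:
--     return "".join(character for character in str(value or "").strip().casefold() if character.isalnum())
--
-- def _resolve_matching_export_preset_name(candidate: str, preset_names: list[str]) -> str:
--     candidate = str(candidate or "").strip()
--     if not candidate:
--         return ""
--     if candidate in preset_names:
--         return candidate
--
--     normalized_candidate = _normalize_export_preset_key(candidate)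
--     for preset_name in preset_names:
--         if _normalize_export_preset_key(preset_name) == normalized_candidate:
--             return preset_name
--     return ""
-- ===== SOURCE B (Python) =====
-- def _normalize_export_preset_key(value: str) -> str:
--     return "".join(character for character in str(value or "").strip().casefold() if character.isalnum())
--
-- def _resolve_matching_export_preset_name(candidate: str, preset_names: list[str]) -> str:
--     candidate = str(candidate or "").strip()
--     if not candidate:
--         return ""
--     normalized_candidate = _normalize_export_preset_key(candidate)
--     fallback = None
--     for preset_name in preset_names:
--         if preset_name == candidate:
--             return candidate
--         if fallback is None and _normalize_export_preset_key(preset_name) == normalized_candidate: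
--             fallback = preset_name
--     return fallback if fallback is not None else ""
-- ===== Notes on version B (the rewrite author's own statement) =====
-- stated objective: alternative
-- what changed: Replaces A's two passes (a membership scan for an exact match followed by a second normalized-key loop) with a single pass that returns immediately on an exact match and records the first normalized match in a fallback accumulator returned after the loop.
import Mathlib
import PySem

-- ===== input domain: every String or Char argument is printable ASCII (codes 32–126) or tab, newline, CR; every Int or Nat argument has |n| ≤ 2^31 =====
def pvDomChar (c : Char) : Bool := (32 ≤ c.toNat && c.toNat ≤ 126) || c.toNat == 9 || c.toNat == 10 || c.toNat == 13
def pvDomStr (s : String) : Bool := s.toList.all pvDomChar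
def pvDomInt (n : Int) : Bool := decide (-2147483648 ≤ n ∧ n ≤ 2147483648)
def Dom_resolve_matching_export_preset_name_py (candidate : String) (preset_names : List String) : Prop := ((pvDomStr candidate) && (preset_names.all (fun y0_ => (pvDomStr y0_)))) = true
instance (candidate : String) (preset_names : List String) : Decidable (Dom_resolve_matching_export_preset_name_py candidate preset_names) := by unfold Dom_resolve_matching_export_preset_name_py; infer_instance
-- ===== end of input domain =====

-- B folds A's two scans (exact-membership pass + normalized-key pass) into one loop with a
-- fallback accumulator; same cost, different decomposition. Return-value equivalence only.

-- ===== PORT A =====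
-- `_normalize_export_preset_key`: strip, casefold (ASCII: lower), keep alphanumeric chars.
def pvNormKey (value : String) : String :=
  String.ofList ((PySem.Str.lower (PySem.Str.strip value)).toList.filter PySem.Chars.isalnum)

def resolve_matching_export_preset_name_py (candidate : String) (preset_names : List String) : String :=
  let candidate := PySem.Str.strip candidate
  if candidate = "" then ""
  else if preset_names.contains candidate then candidate
  else
    let normalized_candidate := pvNormKey candidate
    -- the for-loop returning the first normalized match, else ""
    match preset_names.find? (fun preset_name => pvNormKey preset_name = normalized_candidate) with
    | some preset_name => preset_name
    | none => ""

-- ===== PORT B =====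
-- B's single loop: immediate return on exact match, first normalized match kept as fallback.
def pvLoopB (candidate nc : String) (l : List String) (fb : Option String) : String :=
  match l with
  | [] => fb.getD ""
  | preset_name :: rest =>
    if preset_name = candidate then candidate
    else if fb = none ∧ pvNormKey preset_name = nc then pvLoopB candidate nc rest (some preset_name)
    else pvLoopB candidate nc rest fb

def resolve_matching_export_preset_name_py_alt (candidate : String) (preset_names : List String) : String :=
  let candidate := PySem.Str.strip candidate
  if candidate = "" then ""
  else pvLoopB candidate (pvNormKey candidate) preset_names none

-- ===== PRECONDITION & SPEC =====
def Spec_resolve_matching_export_preset_name_py (candidate : String) (preset_names : List String) (out : String) : Prop := out = resolve_matching_export_preset_name_py_alt candidate preset_names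
instance (candidate : String) (preset_names : List String) (out : String) : Decidable (Spec_resolve_matching_export_preset_name_py candidate preset_names out) := by unfold Spec_resolve_matching_export_preset_name_py; infer_instance

-- ===== CLAIM (what is proved, stated in full; the proofs are below) =====
def Claim_equal_resolve_matching_export_preset_name_py : Prop := ∀ (candidate : String) (preset_names : List String), Dom_resolve_matching_export_preset_name_py candidate preset_names → Spec_resolve_matching_export_preset_name_py candidate preset_names (resolve_matching_export_preset_name_py candidate preset_names)

-- ===== LEMMAS AND PROOFS =====
-- loop invariant: pvLoopB = "exact match wins, else the fallback, else the first normalized match"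
theorem pvLoopB_eq (c nc : String) (l : List String) (fb : Option String) :
    pvLoopB c nc l fb =
      if l.contains c then c
      else fb.getD (((l.find? (fun p => pvNormKey p = nc)).getD "")) := by
  induction l generalizing fb with
  | nil => simp [pvLoopB]
  | cons p rest ih =>
    have hstep : pvLoopB c nc (p :: rest) fb =
        if p = c then c
        else if fb = none ∧ pvNormKey p = nc then pvLoopB c nc rest (some p)
        else pvLoopB c nc rest fb := rfl
    rw [hstep]
    by_cases hp : p = c
    · subst hp; simp
    · rw [if_neg hp]
      have hcon : (p :: rest).contains c = rest.contains c := by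
        simp [Ne.symm hp]
      by_cases hk : pvNormKey p = nc
      · cases fb with
        | none => rw [if_pos ⟨rfl, hk⟩, ih, hcon]; simp [hk]
        | some f => rw [if_neg (by simp), ih, hcon]; simp
      · rw [if_neg (by simp [hk]), ih, hcon]
        cases fb with
        | none => simp [hk]
        | some f => simp

-- ===== VERDICT (by name: the statement is the Claim_ definition above) =====
theorem resolve_matching_export_preset_name_py_spec : Claim_equal_resolve_matching_export_preset_name_py := by
  intro candidate preset_names _
  unfold Spec_resolve_matching_export_preset_name_py
  unfold resolve_matching_export_preset_name_py resolve_matching_export_preset_name_py_alt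
  simp only [pvLoopB_eq]
  by_cases h0 : PySem.Str.strip candidate = ""
  · simp [h0]
  · by_cases hc : preset_names.contains (PySem.Str.strip candidate)
    · simp at hc
      simp [h0, hc]
    · simp at hc
      simp [h0, hc]
      cases preset_names.find? (fun p => pvNormKey p = pvNormKey (PySem.Str.strip candidate)) <;> simp
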